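-- pv_equiv track=rewrite | github.com/Guidoolivero/UniversisadUB | TP Final/Naufrago.py | activar_sonda
-- ===== SOURCE A (Python) =====
-- def activar_sonda(tablero, fila, columna):
--
--     if tablero[fila][columna] == 'N':
--         tablero[fila][columna] = 'R'
--         return "¡Naufrago rescatado!"
--
--     filas = len(tablero)
--     columnas = len(tablero[0])
--
--     # Revisar en las 4 direcciones
--     direcciones = [(-1,0), (1,0), (0,-1), (0,1)]
--
--     for df, dc in direcciones:
--
--         f = fila + df
--         c = columna + dc
--
--         while 0 <= f < filas and 0 <= c < columnas:
--
--             if tablero[f][c] == 'N':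
--                 return "¡Señal detectada! (luz parpadea)"
--
--             f += df
--             c += dc
--
--     return "La señal se pierde (no hay naufragos en linea recta)"
-- ===== SOURCE B (Python) =====
-- # B: replaces A's four outward while-scans by one row membership test and one
-- # column pass. Performs the same in-place 'R' mutation as A on a rescue.
-- def activar_sonda(tablero, fila, columna):
--
--     if tablero[fila][columna] == 'N':
--         tablero[fila][columna] = 'R'
--         return "¡Naufrago rescatado!"
--
--     if 'N' in tablero[fila]:
--         return "¡Señal detectada! (luz parpadea)"
--
--     for row in tablero:
--         if row[columna] == 'N':
--             return "¡Señal detectada! (luz parpadea)"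
--
--     return "La señal se pierde (no hay naufragos en linea recta)"
-- ===== Notes on version B (the rewrite author's own statement) =====
-- stated objective: simpler
-- what changed: The four outward directional while-loops are replaced by a single membership test on the probed row plus one pass down the probed column (the probe cell itself is harmlessly included, being known non-'N').
-- outside the precondition, e.g. on activar_sonda([[''], [], ['N'], ['']], 3, 0): A returns '¡Señal detectada! (luz parpadea)', B raises
import Mathlib
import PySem

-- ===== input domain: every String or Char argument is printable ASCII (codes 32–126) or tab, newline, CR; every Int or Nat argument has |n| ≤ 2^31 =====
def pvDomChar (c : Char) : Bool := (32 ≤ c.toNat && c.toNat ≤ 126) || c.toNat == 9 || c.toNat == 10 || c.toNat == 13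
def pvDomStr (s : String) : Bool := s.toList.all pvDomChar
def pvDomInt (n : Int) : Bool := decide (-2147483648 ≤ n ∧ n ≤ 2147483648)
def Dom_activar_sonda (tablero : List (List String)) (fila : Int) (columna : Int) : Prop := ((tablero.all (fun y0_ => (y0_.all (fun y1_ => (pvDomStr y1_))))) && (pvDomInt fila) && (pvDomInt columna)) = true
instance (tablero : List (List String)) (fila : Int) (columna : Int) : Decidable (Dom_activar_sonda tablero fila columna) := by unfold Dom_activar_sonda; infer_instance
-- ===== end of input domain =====

-- B replaces A's four outward directional while-scans by one row membership test plus one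
-- column pass (objective: simpler). Equivalence is about the RETURN value; the Python B
-- performs the same in-place 'R' mutation as A on a rescue.

-- ===== PORT A =====
-- tablero[f][c] (Python indexing; none = IndexError)
def pvCell (t : List (List String)) (f c : Int) : Option String :=
  (PySem.List.pyGet? t f).bind (fun row => PySem.List.pyGet? row c)

-- the inner 'while 0 <= f < filas and 0 <= c < columnas' loop, fuel-bounded
def pvScan (t : List (List String)) (filas columnas df dc : Int) : Int → Int → Nat → Bool
  | _, _, 0 => false
  | f, c, fuel + 1 =>
    if 0 ≤ f ∧ f < filas ∧ 0 ≤ c ∧ c < columnas then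
      if pvCell t f c = some "N" then true
      else pvScan t filas columnas df dc (f + df) (c + dc) fuel
    else false

def activar_sonda (tablero : List (List String)) (fila : Int) (columna : Int) : String :=
  if pvCell tablero fila columna = some "N" then "¡Naufrago rescatado!"
  else
    let filas : Int := tablero.length
    let columnas : Int := (tablero.headD []).length
    let fuel : Nat := tablero.length + (tablero.headD []).length + 1
    if [((-1 : Int), (0 : Int)), (1, 0), (0, -1), (0, 1)].any
        (fun d => pvScan tablero filas columnas d.1 d.2 (fila + d.1) (columna + d.2) fuel)
    then "¡Señal detectada! (luz parpadea)"
    else "La señal se pierde (no hay naufragos en linea recta)"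

-- ===== PORT B =====
def activar_sonda_alt (tablero : List (List String)) (fila : Int) (columna : Int) : String :=
  if pvCell tablero fila columna = some "N" then "¡Naufrago rescatado!"
  else if ((PySem.List.pyGet? tablero fila).getD []).contains "N" then
    "¡Señal detectada! (luz parpadea)"
  else if tablero.any (fun row => PySem.List.pyGet? row columna = some "N") then
    "¡Señal detectada! (luz parpadea)"
  else
    "La señal se pierde (no hay naufragos en linea recta)"

-- ===== PRECONDITION & SPEC =====
-- Pre_ admits rectangular boards probed at a nonnegative in-range cell, and additionally any
-- board without an 'N' on which neither program raises. It excludes: out-of-range indices and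
-- the empty board (A raises IndexError); ragged boards holding an 'N' (A raises on short rows,
-- and its row scan truncated to len(tablero[0]) is an implementation artefact); and negative
-- in-range indices on boards holding an 'N', an unspecified corner on which A's first lookup
-- wraps around while its directional scans silently skip out-of-range start cells, whereas B
-- wraps consistently — both readings are accidental, neither is the function's purpose.
def Pre_activar_sonda (tablero : List (List String)) (fila : Int) (columna : Int) : Prop :=
  ((∀ row ∈ tablero, row.length = (tablero.headD []).length) ∧
    0 ≤ fila ∧ fila < tablero.length ∧
    0 ≤ columna ∧ columna < (tablero.headD []).length) ∨
  ((∀ row ∈ tablero, ¬ ("N" ∈ row)) ∧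
    PySem.Raise.InRange tablero.length fila ∧
    0 ≤ columna ∧ (∀ row ∈ tablero, columna < row.length) ∧
    (0 ≤ fila → (tablero.headD []).length ≤ (tablero.getD fila.toNat []).length))

instance (tablero : List (List String)) (fila : Int) (columna : Int) : Decidable (Pre_activar_sonda tablero fila columna) := by unfold Pre_activar_sonda; infer_instance

def pvWitness_activar_sonda : List (List String) × Int × Int := ([[".", "N"], [".", "."]], 1, 0)

def Spec_activar_sonda (tablero : List (List String)) (fila : Int) (columna : Int) (out : String) : Prop := out = activar_sonda_alt tablero fila columna
instance (tablero : List (List String)) (fila : Int) (columna : Int) (out : String) : Decidable (Spec_activar_sonda tablero fila columna out) := by unfold Spec_activar_sonda; infer_instance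

-- ===== CLAIM (what is proved, stated in full; the proofs are below) =====
def Claim_equal_activar_sonda : Prop := ∀ (tablero : List (List String)) (fila : Int) (columna : Int), Dom_activar_sonda tablero fila columna → Pre_activar_sonda tablero fila columna → Spec_activar_sonda tablero fila columna (activar_sonda tablero fila columna)

-- ===== LEMMAS AND PROOFS =====

theorem pvScan_down (t : List (List String)) (L c : Int)
    (hc : 0 ≤ c ∧ c < L) :
    ∀ (fuel : Nat) (f : Int), 0 ≤ f → t.length ≤ f.toNat + fuel →
    (pvScan t t.length L 1 0 f c fuel = true ↔
      ∃ g : Int, f ≤ g ∧ g < t.length ∧ pvCell t g c = some "N") := by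
  intro fuel
  induction fuel with
  | zero =>
    intro f hf hfuel
    simp only [pvScan]
    constructor
    · intro h; exact absurd h (by simp)
    · rintro ⟨g, h1, h2, _⟩; omega
  | succ fuel ih =>
    intro f hf hfuel
    simp only [pvScan, add_zero]
    split_ifs with hcond hcell
    · simp only [true_iff]
      exact ⟨f, le_refl f, hcond.2.1, hcell⟩
    · rw [ih (f + 1) (by omega) (by omega)]
      constructor
      · rintro ⟨g, h1, h2, h3⟩; exact ⟨g, by omega, h2, h3⟩
      · rintro ⟨g, h1, h2, h3⟩
        by_cases hg : g = f
        · exact absurd (hg ▸ h3) hcell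
        · exact ⟨g, by omega, h2, h3⟩
    · simp only [false_iff]
      rintro ⟨g, h1, h2, _⟩
      omega

theorem pvScan_negf (t : List (List String)) (filas columnas df dc c : Int) (fuel : Nat)
    (f : Int) (hf : f < 0) : pvScan t filas columnas df dc f c fuel = false := by
  cases fuel with
  | zero => rfl
  | succ n => simp only [pvScan]; rw [if_neg (fun h => absurd h.1 (by omega))]

theorem pvScan_negc (t : List (List String)) (filas columnas df dc f : Int) (fuel : Nat)
    (c : Int) (hc : c < 0) : pvScan t filas columnas df dc f c fuel = false := by
  cases fuel with
  | zero => rfl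
  | succ n => simp only [pvScan]; rw [if_neg (fun h => absurd h.2.2.1 (by omega))]

theorem pvScan_up (t : List (List String)) (L c : Int)
    (hc : 0 ≤ c ∧ c < L) :
    ∀ (fuel : Nat) (f : Int), f < t.length → f.toNat < fuel →
    (pvScan t t.length L (-1) 0 f c fuel = true ↔
      ∃ g : Int, 0 ≤ g ∧ g ≤ f ∧ pvCell t g c = some "N") := by
  intro fuel
  induction fuel with
  | zero => intro f hf hfuel; exact absurd hfuel (by omega)
  | succ fuel ih =>
    intro f hf hfuel
    simp only [pvScan, add_zero]
    split_ifs with hcond hcell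
    · simp only [true_iff]
      exact ⟨f, hcond.1, le_refl f, hcell⟩
    · by_cases h0 : 0 < f
      · rw [ih (f + -1) (by omega) (by omega)]
        constructor
        · rintro ⟨g, h1, h2, h3⟩; exact ⟨g, h1, by omega, h3⟩
        · rintro ⟨g, h1, h2, h3⟩
          by_cases hg : g = f
          · exact absurd (hg ▸ h3) hcell
          · exact ⟨g, h1, by omega, h3⟩
      · have hf0 : f = 0 := by omega
        subst hf0
        rw [pvScan_negf t _ L (-1) 0 c fuel (0 + -1) (by omega)]
        simp only [Bool.false_eq_true, false_iff]
        rintro ⟨g, h1, h2, h3⟩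
        have hg : g = 0 := by omega
        exact hcell (hg ▸ h3)
    · simp only [false_iff]
      rintro ⟨g, h1, h2, _⟩
      omega

theorem pvScan_right (t : List (List String)) (L f : Int)
    (hf : 0 ≤ f ∧ f < t.length) :
    ∀ (fuel : Nat) (c : Int), 0 ≤ c → L.toNat ≤ c.toNat + fuel →
    (pvScan t t.length L 0 1 f c fuel = true ↔
      ∃ d : Int, c ≤ d ∧ d < L ∧ pvCell t f d = some "N") := by
  intro fuel
  induction fuel with
  | zero =>
    intro c hcpos hfuel
    simp only [pvScan]
    constructor
    · intro h; exact absurd h (by simp)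
    · rintro ⟨d, h1, h2, _⟩; omega
  | succ fuel ih =>
    intro c hcpos hfuel
    simp only [pvScan, add_zero]
    split_ifs with hcond hcell
    · simp only [true_iff]
      exact ⟨c, le_refl c, hcond.2.2.2, hcell⟩
    · rw [ih (c + 1) (by omega) (by omega)]
      constructor
      · rintro ⟨d, h1, h2, h3⟩; exact ⟨d, by omega, h2, h3⟩
      · rintro ⟨d, h1, h2, h3⟩
        by_cases hd : d = c
        · exact absurd (hd ▸ h3) hcell
        · exact ⟨d, by omega, h2, h3⟩
    · simp only [false_iff]
      rintro ⟨d, h1, h2, _⟩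
      omega

theorem pvScan_left (t : List (List String)) (L f : Int)
    (hf : 0 ≤ f ∧ f < t.length) :
    ∀ (fuel : Nat) (c : Int), c < L → c.toNat < fuel →
    (pvScan t t.length L 0 (-1) f c fuel = true ↔
      ∃ d : Int, 0 ≤ d ∧ d ≤ c ∧ pvCell t f d = some "N") := by
  intro fuel
  induction fuel with
  | zero => intro c hcL hfuel; exact absurd hfuel (by omega)
  | succ fuel ih =>
    intro c hcL hfuel
    simp only [pvScan, add_zero]
    split_ifs with hcond hcell
    · simp only [true_iff]
      exact ⟨c, hcond.2.2.1, le_refl c, hcell⟩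
    · by_cases h0 : 0 < c
      · rw [ih (c + -1) (by omega) (by omega)]
        constructor
        · rintro ⟨d, h1, h2, h3⟩; exact ⟨d, h1, by omega, h3⟩
        · rintro ⟨d, h1, h2, h3⟩
          by_cases hd : d = c
          · exact absurd (hd ▸ h3) hcell
          · exact ⟨d, h1, by omega, h3⟩
      · have hc0 : c = 0 := by omega
        subst hc0
        rw [pvScan_negc t _ L 0 (-1) f fuel (0 + -1) (by omega)]
        simp only [Bool.false_eq_true, false_iff]
        rintro ⟨d, h1, h2, h3⟩
        have hd : d = 0 := by omega
        exact hcell (hd ▸ h3)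
    · simp only [false_iff]
      rintro ⟨d, h1, h2, _⟩
      omega

theorem pvRow_iff (t : List (List String)) (fila : Int)
    (hrect : ∀ row ∈ t, row.length = (t.headD []).length)
    (hf0 : 0 ≤ fila) (hfN : fila < t.length) :
    (((PySem.List.pyGet? t fila).getD []).contains "N" = true) ↔
      ∃ d : Int, 0 ≤ d ∧ d < ((t.headD []).length : Int) ∧ pvCell t fila d = some "N" := by
  have hlt : fila.toNat < t.length := by omega
  have hget := PySem.List.pyGet?_eq_some_getElem t hf0 hfN
  have hlen : (t[fila.toNat]'hlt).length = (t.headD []).length :=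
    hrect _ (List.getElem_mem hlt)
  rw [hget]
  simp only [Option.getD_some, List.contains_iff_mem, List.mem_iff_getElem]
  constructor
  · rintro ⟨i, hi, heq⟩
    refine ⟨(i : Int), by omega, by omega, ?_⟩
    simp only [pvCell, hget, Option.bind_some, PySem.List.pyGet?_natCast]
    simp [List.getElem?_eq_getElem hi, heq]
  · rintro ⟨d, hd0, hdL, hcell⟩
    simp only [pvCell, hget, Option.bind_some] at hcell
    rw [PySem.List.pyGet?_eq_some_getElem _ hd0 (by omega)] at hcell
    exact ⟨d.toNat, by omega, by injection hcell⟩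

theorem pvCol_iff (t : List (List String)) (columna : Int) :
    ((t.any fun row => PySem.List.pyGet? row columna = some "N") = true) ↔
      ∃ g : Int, 0 ≤ g ∧ g < (t.length : Int) ∧ pvCell t g columna = some "N" := by
  simp only [List.any_eq_true, decide_eq_true_eq, List.mem_iff_getElem]
  constructor
  · rintro ⟨row, ⟨i, hi, heq⟩, hrow⟩
    refine ⟨(i : Int), by omega, by omega, ?_⟩
    simp only [pvCell, PySem.List.pyGet?_natCast]
    simp [List.getElem?_eq_getElem hi, heq, hrow]
  · rintro ⟨g, hg0, hgN, hcell⟩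
    simp only [pvCell, PySem.List.pyGet?_eq_some_getElem t hg0 hgN, Option.bind_some] at hcell
    exact ⟨t[g.toNat]'(by omega), ⟨g.toNat, by omega, rfl⟩, hcell⟩


theorem pvCell_mem (t : List (List String)) (f c : Int) (s : String)
    (h : pvCell t f c = some s) : ∃ row ∈ t, s ∈ row := by
  simp only [pvCell] at h
  cases hg : PySem.List.pyGet? t f with
  | none => rw [hg] at h; simp at h
  | some row =>
    rw [hg] at h
    simp only [Option.bind_some] at h
    exact ⟨row, PySem.List.mem_of_pyGet?_eq_some _ hg,
      PySem.List.mem_of_pyGet?_eq_some _ h⟩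

theorem pvScan_noN (t : List (List String)) (filas columnas df dc : Int)
    (hno : ∀ row ∈ t, ¬ ("N" ∈ row)) :
    ∀ (fuel : Nat) (f c : Int), pvScan t filas columnas df dc f c fuel = false := by
  intro fuel
  induction fuel with
  | zero => intro f c; rfl
  | succ n ih =>
    intro f c
    simp only [pvScan]
    split_ifs with hcond hcell
    · obtain ⟨row, hrow, hNmem⟩ := pvCell_mem t f c "N" hcell
      exact absurd hNmem (hno row hrow)
    · exact ih _ _
    · rfl

theorem main_noN (t : List (List String)) (fila columna : Int)
    (hno : ∀ row ∈ t, ¬ ("N" ∈ row)) :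
    activar_sonda t fila columna = activar_sonda_alt t fila columna := by
  have hN : ¬ pvCell t fila columna = some "N" := fun h => by
    obtain ⟨row, hrow, hNmem⟩ := pvCell_mem t fila columna "N" h
    exact absurd hNmem (hno row hrow)
  have hany : ¬ (t.any fun row => PySem.List.pyGet? row columna = some "N") = true := by
    intro hx
    rw [List.any_eq_true] at hx
    obtain ⟨row, hrow, hp⟩ := hx
    rw [decide_eq_true_eq] at hp
    exact absurd (PySem.List.mem_of_pyGet?_eq_some _ hp) (hno row hrow)
  have hcont : ¬ ((PySem.List.pyGet? t fila).getD []).contains "N" = true := by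
    intro hx
    cases hg : PySem.List.pyGet? t fila with
    | none => rw [hg] at hx; simp at hx
    | some row =>
      rw [hg] at hx
      simp only [Option.getD_some, List.contains_iff_mem] at hx
      exact absurd hx (hno row (PySem.List.mem_of_pyGet?_eq_some _ hg))
  simp only [activar_sonda, activar_sonda_alt, if_neg hN, if_neg hany, if_neg hcont]
  rw [if_neg]
  intro hx
  simp only [List.any_cons, List.any_nil, Bool.or_eq_true, Bool.false_eq_true, or_false] at hx
  rcases hx with hb | hb | hb | hb <;>
    exact absurd hb (by rw [pvScan_noN t _ _ _ _ hno]; simp)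

theorem main_eq (t : List (List String)) (fila columna : Int)
    (hrect : ∀ row ∈ t, row.length = (t.headD []).length)
    (hf0 : 0 ≤ fila) (hfN : fila < t.length)
    (hc0 : 0 ≤ columna) (hcL : columna < ((t.headD []).length : Int)) :
    activar_sonda t fila columna = activar_sonda_alt t fila columna := by
  by_cases hN : pvCell t fila columna = some "N"
  · simp only [activar_sonda, activar_sonda_alt, if_pos hN]
  · have hup := pvScan_up t ((t.headD []).length : Int) columna ⟨hc0, hcL⟩
      (t.length + (t.headD []).length + 1) (fila + -1) (by omega) (by omega)
    have hdown := pvScan_down t ((t.headD []).length : Int) columna ⟨hc0, hcL⟩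
      (t.length + (t.headD []).length + 1) (fila + 1) (by omega) (by omega)
    have hleft := pvScan_left t ((t.headD []).length : Int) fila ⟨hf0, hfN⟩
      (t.length + (t.headD []).length + 1) (columna + -1) (by omega) (by omega)
    have hright := pvScan_right t ((t.headD []).length : Int) fila ⟨hf0, hfN⟩
      (t.length + (t.headD []).length + 1) (columna + 1) (by omega) (by omega)
    have hRow := pvRow_iff t fila hrect hf0 hfN
    have hCol := pvCol_iff t columna
    simp only [activar_sonda, activar_sonda_alt, if_neg hN, List.any_cons, List.any_nil,
      Bool.or_false, add_zero]
    split_ifs with ha hb hc hd he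
    · rfl
    · rfl
    · -- A señal, B lost: contradiction
      exfalso
      rcases (by simpa only [Bool.or_eq_true] using ha :
          _ ∨ _ ∨ _ ∨ _) with hb' | hb' | hb' | hb'
      · rcases hup.mp hb' with ⟨g, k1, k2, k3⟩
        exact hc (hCol.mpr ⟨g, k1, by omega, k3⟩)
      · rcases hdown.mp hb' with ⟨g, k1, k2, k3⟩
        exact hc (hCol.mpr ⟨g, by omega, k2, k3⟩)
      · rcases hleft.mp hb' with ⟨d, k1, k2, k3⟩
        exact hb (hRow.mpr ⟨d, k1, by omega, k3⟩)
      · rcases hright.mp hb' with ⟨d, k1, k2, k3⟩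
        exact hb (hRow.mpr ⟨d, by omega, k2, k3⟩)
    · -- ¬A, B row: contradiction
      exfalso
      rcases hRow.mp hd with ⟨d, k1, k2, k3⟩
      simp only [Bool.or_eq_true, not_or] at ha
      by_cases hdc : d = columna
      · exact hN (hdc ▸ k3)
      · by_cases hlt : d < columna
        · exact ha.2.2.1 (hleft.mpr ⟨d, k1, by omega, k3⟩)
        · exact ha.2.2.2 (hright.mpr ⟨d, by omega, k2, k3⟩)
    · -- ¬A, ¬B, C col: contradiction
      exfalso
      rcases hCol.mp he with ⟨g, k1, k2, k3⟩
      simp only [Bool.or_eq_true, not_or] at ha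
      by_cases hgf : g = fila
      · exact hN (hgf ▸ k3)
      · by_cases hlt : g < fila
        · exact ha.1 (hup.mpr ⟨g, k1, by omega, k3⟩)
        · exact ha.2.1 (hdown.mpr ⟨g, by omega, k2, k3⟩)
    · rfl


-- ===== VERDICT (by name: the statement is the Claim_ definition above) =====
theorem activar_sonda_spec : Claim_equal_activar_sonda := by
  intro tablero fila columna _ hpre
  unfold Spec_activar_sonda
  rcases hpre with ⟨hrect, hf0, hfN, hc0, hcL⟩ | ⟨hno, _⟩
  · exact main_eq tablero fila columna hrect hf0 hfN hc0 hcL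
  · exact main_noN tablero fila columna hno
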